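-- pv_equiv track=rewrite | github.com/atinjin/study | algorithm/way_to_sum/way_to_sum.py | way_to_sum
-- ===== SOURCE A (Python) =====
-- def way_to_sum(target, limit):
--     count = [0 for _ in range(target + 1)]
--     count[0] = 1
--
--     for i in range(1, target+1):
--         for m in range(1, limit+1):
--             if i > m:
--                 if m == 1:
--                     count[i] += count[i - m]
--                 else:
--                     count[i] = count[i] + count[i - m] - count[i - m - 1]
--             if i == m:
--                 count[i] += 1
--
--     return count[target]
-- ===== SOURCE B (Python) =====
-- def way_to_sum(target, limit):
--     count = [0] * (target + 1)
--     count[0] = 1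
--     for i in range(1, target + 1):
--         c = 1 if i <= limit else 0
--         if limit >= 1 and i > 1:
--             c += count[i - 1]
--         M = min(limit, i - 1)
--         if M >= 2:
--             c += count[i - 2] - count[i - M - 1]
--         count[i] = c
--     return count[target]
-- ===== Notes on version B (the rewrite author's own statement) =====
-- stated objective: faster
-- what changed: B telescopes A's inner sum over m (count[i-m]-count[i-m-1] collapses), so each count[i] is computed in O(1) from three earlier entries instead of an O(limit) inner loop.
import Mathlib
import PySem

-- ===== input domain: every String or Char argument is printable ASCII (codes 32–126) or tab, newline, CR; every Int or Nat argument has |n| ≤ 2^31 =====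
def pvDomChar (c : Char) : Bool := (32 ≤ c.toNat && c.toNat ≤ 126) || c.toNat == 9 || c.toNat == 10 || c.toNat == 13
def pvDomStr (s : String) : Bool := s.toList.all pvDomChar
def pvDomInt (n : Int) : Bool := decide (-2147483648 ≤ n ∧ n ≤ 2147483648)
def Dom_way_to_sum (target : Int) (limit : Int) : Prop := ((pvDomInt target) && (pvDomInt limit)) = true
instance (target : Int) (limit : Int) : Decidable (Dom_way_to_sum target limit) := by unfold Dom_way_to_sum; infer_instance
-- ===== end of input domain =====

-- B replaces A's O(target·limit) double loop by an O(target) recurrence: the inner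
-- sum over m telescopes, so each count[i] is computed in O(1) from three earlier entries.

-- ===== PORT A =====
-- body of A's inner 'for m in range(1, limit+1)' loop, verbatim
def wtsInnerStep (i : Int) (count : List Int) (m : Int) : List Int :=
  let count :=
    if m < i then
      if m = 1 then
        PySem.List.pySetD count i (PySem.List.pyGetD count i 0 + PySem.List.pyGetD count (i - m) 0)
      else
        PySem.List.pySetD count i
          (PySem.List.pyGetD count i 0 + PySem.List.pyGetD count (i - m) 0
            - PySem.List.pyGetD count (i - m - 1) 0)
    else count
  if i = m then PySem.List.pySetD count i (PySem.List.pyGetD count i 0 + 1) else count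

def way_to_sum (target : Int) (limit : Int) : Int :=
  let count := (PySem.List.pyRange 0 (target + 1) 1).map (fun _ => (0 : Int))
  let count := PySem.List.pySetD count 0 1
  let count := (PySem.List.pyRange 1 (target + 1) 1).foldl
      (fun count i => (PySem.List.pyRange 1 (limit + 1) 1).foldl (wtsInnerStep i) count) count
  PySem.List.pyGetD count target 0

-- ===== PORT B =====
-- body of B's single 'for i in range(1, target+1)' loop, verbatim
def wtsAltStep (limit : Int) (count : List Int) (i : Int) : List Int :=
  let c : Int := if i ≤ limit then 1 else 0
  let c := if 1 ≤ limit ∧ 1 < i then c + PySem.List.pyGetD count (i - 1) 0 else c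
  let M := min limit (i - 1)
  let c := if 2 ≤ M then c + PySem.List.pyGetD count (i - 2) 0 - PySem.List.pyGetD count (i - M - 1) 0 else c
  PySem.List.pySetD count i c

def way_to_sum_alt (target : Int) (limit : Int) : Int :=
  let count := List.replicate (target + 1).toNat (0 : Int)
  let count := PySem.List.pySetD count 0 1
  let count := (PySem.List.pyRange 1 (target + 1) 1).foldl (wtsAltStep limit) count
  PySem.List.pyGetD count target 0

-- ===== PRECONDITION & SPEC =====
-- A raises IndexError when target < 0 ('count[0] = 1' on the empty list); B raises there too.
def Pre_way_to_sum (target : Int) (limit : Int) : Prop := 0 ≤ target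
instance (target : Int) (limit : Int) : Decidable (Pre_way_to_sum target limit) := by
  unfold Pre_way_to_sum; infer_instance
def pvWitness_way_to_sum : Int × Int := (5, 3)

def Spec_way_to_sum (target : Int) (limit : Int) (out : Int) : Prop := out = way_to_sum_alt target limit
instance (target : Int) (limit : Int) (out : Int) : Decidable (Spec_way_to_sum target limit out) := by
  unfold Spec_way_to_sum; infer_instance

-- ===== CLAIM (what is proved, stated in full; the proofs are below) =====
def Claim_equal_way_to_sum : Prop := ∀ (target : Int) (limit : Int), Dom_way_to_sum target limit → Pre_way_to_sum target limit → Spec_way_to_sum target limit (way_to_sum target limit)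

-- ===== LEMMAS AND PROOFS =====

-- the contribution of inner-loop iteration m to count[i]
def wtsTerm (g : Int → Int) (i m : Int) : Int :=
  (if m < i then (if m = 1 then g (i - 1) else g (i - m) - g (i - m - 1)) else 0)
    + (if i = m then 1 else 0)

lemma wtsTerm_congr {g g' : Int → Int} (i m : Int) (hi : 1 ≤ i) (hm : 1 ≤ m)
    (h : ∀ j, 0 ≤ j → j < i → g j = g' j) : wtsTerm g i m = wtsTerm g' i m := by
  unfold wtsTerm
  congr 1
  by_cases hlt : m < i
  · simp only [if_pos hlt]
    by_cases h1 : m = 1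
    · subst h1
      simp only [if_pos rfl]
      exact h _ (by omega) (by omega)
    · simp only [if_neg h1]
      rw [h _ (by omega) (by omega), h _ (by omega) (by omega)]
  · simp only [if_neg hlt]

lemma pySetD_getD_self (c : List Int) (i : Int) (hi : 0 ≤ i) :
    PySem.List.pySetD c i (PySem.List.pyGetD c i 0) = c := by
  rw [PySem.List.pySetD_of_nonneg c _ hi, PySem.List.pyGetD_of_nonneg c _ hi]
  by_cases h : i.toNat < c.length
  · rw [List.getD_eq_getElem c 0 h, List.set_getElem_self]
  · rw [List.set_eq_of_length_le (by omega)]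

lemma getD_setD_ne (c : List Int) (i j v d) (hi : 0 ≤ i) (hj : 0 ≤ j) (hne : i ≠ j) :
    PySem.List.pyGetD (PySem.List.pySetD c j v) i d = PySem.List.pyGetD c i d := by
  rw [PySem.List.pySetD_of_nonneg c _ hj, PySem.List.pyGetD_of_nonneg _ _ hi,
    PySem.List.pyGetD_of_nonneg c _ hi]
  unfold List.getD
  rw [List.getElem?_set_ne (by omega)]

lemma getD_setD_self (c : List Int) (i v d) (hi : 0 ≤ i) (hlen : i < (c.length : Int)) :
    PySem.List.pyGetD (PySem.List.pySetD c i v) i d = v := by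
  rw [PySem.List.pySetD_of_nonneg c _ hi, PySem.List.pyGetD_of_nonneg _ _ hi]
  unfold List.getD
  rw [List.getElem?_set_self (by omega)]
  rfl

lemma setD_setD (c : List Int) (i v w) (hi : 0 ≤ i) :
    PySem.List.pySetD (PySem.List.pySetD c i v) i w = PySem.List.pySetD c i w := by
  rw [PySem.List.pySetD_of_nonneg c _ hi, PySem.List.pySetD_of_nonneg _ _ hi,
    PySem.List.pySetD_of_nonneg c _ hi, List.set_set]

lemma length_setD (c : List Int) (i v) :
    (PySem.List.pySetD c i v).length = c.length := by
  unfold PySem.List.pySetD PySem.List.pySet?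
  cases h : PySem.List.pyIdx? c.length i <;> simp

-- one inner-loop iteration only changes count[i], by wtsTerm
lemma innerStep_eq (c : List Int) (i m : Int) (hi : 1 ≤ i) (hm : 1 ≤ m) :
    wtsInnerStep i c m
      = PySem.List.pySetD c i
          (PySem.List.pyGetD c i 0 + wtsTerm (fun j => PySem.List.pyGetD c j 0) i m) := by
  unfold wtsInnerStep wtsTerm
  by_cases hlt : m < i
  · have hne : ¬ i = m := by omega
    by_cases h1 : m = 1
    · have hne1 : ¬ i = 1 := by omega
      subst h1
      simp only [if_pos hlt, if_neg hne1, if_true]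
      congr 1
      ring
    · simp only [if_pos hlt, if_neg h1, if_neg hne]
      congr 1
      ring
  · by_cases heq : i = m
    · simp only [if_neg hlt, if_pos heq]
      congr 1
      try ring
    · simp only [if_neg hlt, if_neg heq]
      rw [add_zero, add_zero]
      exact (pySetD_getD_self c i (by omega)).symm

-- the whole inner loop, folded into one write of the summed contributions
lemma inner_fold (i : Int) (hi : 1 ≤ i) (ms : List Int) (hms : ∀ m ∈ ms, 1 ≤ m) :
    ∀ c : List Int, i < (c.length : Int) →
    ms.foldl (wtsInnerStep i) c
      = PySem.List.pySetD c i
          (PySem.List.pyGetD c i 0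
            + (ms.map (wtsTerm (fun j => PySem.List.pyGetD c j 0) i)).sum) := by
  induction ms with
  | nil => intro c _; simpa using (pySetD_getD_self c i (by omega)).symm
  | cons m rest ih =>
    intro c hlen
    have hm : 1 ≤ m := hms m (by simp)
    have hrest : ∀ m' ∈ rest, 1 ≤ m' := fun m' h => hms m' (by simp [h])
    have step := innerStep_eq c i m hi hm
    simp only [List.foldl_cons, step]
    set c' := PySem.List.pySetD c i
      (PySem.List.pyGetD c i 0 + wtsTerm (fun j => PySem.List.pyGetD c j 0) i m) with hc'
    have hlen' : i < (c'.length : Int) := by rw [hc', length_setD]; exact hlen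
    rw [ih hrest c' hlen']
    have hgets : ∀ j, 0 ≤ j → j < i →
        PySem.List.pyGetD c' j 0 = PySem.List.pyGetD c j 0 := by
      intro j hj0 hji
      exact getD_setD_ne c j i _ 0 hj0 (by omega) (by omega)
    have hmap : rest.map (wtsTerm (fun j => PySem.List.pyGetD c' j 0) i)
        = rest.map (wtsTerm (fun j => PySem.List.pyGetD c j 0) i) := by
      apply List.map_congr_left
      intro m' hm'
      exact wtsTerm_congr i m' hi (hrest m' hm') hgets
    rw [hmap, hc', getD_setD_self c i _ 0 (by omega) hlen,
      setD_setD c i _ _ (by omega)]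
    congr 1
    simp [add_assoc]

-- closed (telescoped) form of the inner sum
lemma term_sum_aux (g : Int → Int) (i : Int) (hi : 1 ≤ i) :
    ∀ L : Int, 0 ≤ L →
    ((PySem.List.pyRange 1 (L + 1) 1).map (wtsTerm g i)).sum =
      (if i ≤ L then 1 else 0) + (if 1 ≤ L ∧ 1 < i then g (i - 1) else 0)
        + (if 2 ≤ min L (i - 1) then g (i - 2) - g (i - min L (i - 1) - 1) else 0) := by
  intro L hL
  induction L, hL using Int.le_induction with
  | base =>
    rw [show PySem.List.pyRange 1 ((0:Int) + 1) 1 = [] from PySem.List.pyRange_one_eq_nil (by omega)]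
    have h1 : ¬ i ≤ (0 : Int) := by omega
    have h3 : ¬ 2 ≤ min (0 : Int) (i - 1) := by omega
    simp [h1, h3]
  | succ L hL0 ih =>
    rw [PySem.List.pyRange_one_succ_right (by omega), List.map_append, List.sum_append, ih]
    unfold wtsTerm
    simp only [List.map_cons, List.map_nil, List.sum_cons, List.sum_nil, add_zero]
    by_cases hc1 : i ≤ L
    · have e4 : min (L + 1) (i - 1) = min L (i - 1) := by omega
      rw [e4]
      split_ifs <;> first | omega | ring
    · by_cases hc2 : i = L + 1
      · have e4 : min (L + 1) (i - 1) = min L (i - 1) := by omega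
        rw [e4]
        split_ifs <;> first | omega | ring
      · have hgt : L + 1 < i := by omega
        by_cases hL1 : L = 1
        · subst hL1
          have e2 : min (1 : Int) (i - 1) = 1 := by omega
          have e3 : min (1 + 1 : Int) (i - 1) = 2 := by omega
          rw [e2, e3]
          split_ifs <;> first | omega | ring
        · have e2 : min L (i - 1) = L := by omega
          have e3 : min (L + 1) (i - 1) = L + 1 := by omega
          rw [e2, e3]
          have e5 : i - (L + 1) - 1 = i - L - 2 := by ring
          have e6 : i - (L + 1) = i - L - 1 := by ring
          rw [e5, e6]
          split_ifs <;> first | omega | ring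

lemma term_sum (g : Int → Int) (i : Int) (hi : 1 ≤ i) (L : Int) :
    ((PySem.List.pyRange 1 (L + 1) 1).map (wtsTerm g i)).sum =
      (if i ≤ L then 1 else 0) + (if 1 ≤ L ∧ 1 < i then g (i - 1) else 0)
        + (if 2 ≤ min L (i - 1) then g (i - 2) - g (i - min L (i - 1) - 1) else 0) := by
  by_cases hL : L ≤ 0
  · rw [PySem.List.pyRange_one_eq_nil (show L + 1 ≤ 1 by omega)]
    have h1 : ¬ i ≤ L := by omega
    have h2 : ¬ (1 ≤ L ∧ 1 < i) := by omega
    have h3 : ¬ 2 ≤ min L (i - 1) := by omega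
    simp [h1, h2, h3]
  · exact term_sum_aux g i hi L (by omega)

-- one outer iteration of A equals one outer iteration of B (count[i] still 0)
lemma step_eq (limit : Int) (c : List Int) (i : Int) (hi : 1 ≤ i)
    (hlen : i < (c.length : Int)) (hz : PySem.List.pyGetD c i 0 = 0) :
    (PySem.List.pyRange 1 (limit + 1) 1).foldl (wtsInnerStep i) c = wtsAltStep limit c i := by
  have hms : ∀ m ∈ PySem.List.pyRange 1 (limit + 1) 1, 1 ≤ m := by
    intro m hm; exact ((PySem.List.mem_pyRange_one).1 hm).1
  rw [inner_fold i hi _ hms c hlen, hz,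
    term_sum (fun j => PySem.List.pyGetD c j 0) i hi limit]
  unfold wtsAltStep
  congr 1
  split_ifs <;> ring

-- every entry except index 0 of the initial list is 0
lemma init_getD_zero (n j : Int) (hj : 1 ≤ j) :
    PySem.List.pyGetD (PySem.List.pySetD ((PySem.List.pyRange 0 (n + 1) 1).map (fun _ => (0 : Int))) 0 1) j 0 = 0 := by
  rw [PySem.List.pySetD_of_nonneg _ _ (by omega), PySem.List.pyGetD_of_nonneg _ _ (by omega)]
  have hne : (0 : Nat) ≠ j.toNat := by omega
  simp [List.getD, hne, List.getElem?_replicate]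
  split <;> rfl

-- the two outer folds agree and keep entries ≥ k zero
lemma outer_fold (limit n : Int) (hn : 0 ≤ n) :
    ∀ k : Int, 1 ≤ k → k ≤ n + 1 →
    ((PySem.List.pyRange 1 k 1).foldl
        (fun count i => (PySem.List.pyRange 1 (limit + 1) 1).foldl (wtsInnerStep i) count)
        (PySem.List.pySetD ((PySem.List.pyRange 0 (n + 1) 1).map (fun _ => (0 : Int))) 0 1)
      = (PySem.List.pyRange 1 k 1).foldl (wtsAltStep limit)
        (PySem.List.pySetD ((PySem.List.pyRange 0 (n + 1) 1).map (fun _ => (0 : Int))) 0 1))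
    ∧ ((PySem.List.pyRange 1 k 1).foldl (wtsAltStep limit)
        (PySem.List.pySetD ((PySem.List.pyRange 0 (n + 1) 1).map (fun _ => (0 : Int))) 0 1)).length
        = (n + 1).toNat
    ∧ ∀ j, k ≤ j → PySem.List.pyGetD
        ((PySem.List.pyRange 1 k 1).foldl (wtsAltStep limit)
          (PySem.List.pySetD ((PySem.List.pyRange 0 (n + 1) 1).map (fun _ => (0 : Int))) 0 1)) j 0 = 0 := by
  intro k hk1
  induction k, hk1 using Int.le_induction with
  | base =>
    intro _
    rw [show PySem.List.pyRange 1 (1 : Int) 1 = [] from PySem.List.pyRange_one_eq_nil (by omega)]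
    simp only [List.foldl_nil]
    refine ⟨trivial, ?_, ?_⟩
    · rw [length_setD, List.length_map, PySem.List.length_pyRange_one]
      omega
    · intro j hj
      exact init_getD_zero n j hj
  | succ k hk ih =>
    intro hkn
    have prev := ih (by omega)
    obtain ⟨heq, hlen, hzero⟩ := prev
    have hsplit : PySem.List.pyRange 1 (k + 1) 1 = PySem.List.pyRange 1 k 1 ++ [k] :=
      PySem.List.pyRange_one_succ_right (by omega)
    rw [hsplit]
    simp only [List.foldl_append, List.foldl_cons, List.foldl_nil]
    set cB := (PySem.List.pyRange 1 k 1).foldl (wtsAltStep limit)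
      (PySem.List.pySetD ((PySem.List.pyRange 0 (n + 1) 1).map (fun _ => (0 : Int))) 0 1) with hcB
    have hlenk : k < (cB.length : Int) := by rw [hlen]; omega
    have hstep : (PySem.List.pyRange 1 (limit + 1) 1).foldl (wtsInnerStep k) cB
        = wtsAltStep limit cB k := step_eq limit cB k (by omega) hlenk (hzero k (le_refl k))
    refine ⟨by rw [heq, hstep], ?_, ?_⟩
    · unfold wtsAltStep
      rw [length_setD]; exact hlen
    · intro j hj
      unfold wtsAltStep
      rw [getD_setD_ne cB j k _ 0 (by omega) (by omega) (by omega)]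
      exact hzero j (by omega)

-- ===== VERDICT (by name: the statement is the Claim_ definition above) =====
theorem way_to_sum_spec : Claim_equal_way_to_sum := by
  intro target limit _ hpre
  unfold Spec_way_to_sum
  have hpre' : (0 : Int) ≤ target := hpre
  have hinit : (PySem.List.pyRange 0 (target + 1) 1).map (fun _ => (0 : Int))
      = List.replicate (target + 1).toNat (0 : Int) := by
    rw [List.eq_replicate_iff]
    constructor
    · rw [List.length_map, PySem.List.length_pyRange_one]
      congr 1
      omega
    · intro b hb
      rcases List.mem_map.1 hb with ⟨x, _, hx⟩
      omega
  obtain ⟨heq, _, _⟩ := outer_fold limit target hpre' (target + 1) (by omega) (le_refl _)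
  have gA : way_to_sum target limit
      = PySem.List.pyGetD
          ((PySem.List.pyRange 1 (target + 1) 1).foldl
            (fun count i => (PySem.List.pyRange 1 (limit + 1) 1).foldl (wtsInnerStep i) count)
            (PySem.List.pySetD ((PySem.List.pyRange 0 (target + 1) 1).map (fun _ => (0 : Int))) 0 1))
          target 0 := rfl
  have gB : way_to_sum_alt target limit
      = PySem.List.pyGetD
          ((PySem.List.pyRange 1 (target + 1) 1).foldl (wtsAltStep limit)
            (PySem.List.pySetD (List.replicate (target + 1).toNat (0 : Int)) 0 1))
          target 0 := rfl
  rw [gA, gB, ← hinit, heq]
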